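-- pv_equiv track=rewrite | github.com/jsell-rh/hyperloop | src/dashboard/server/routes/metrics.py | _group_events_by_cycle
-- ===== SOURCE A (Python) =====
-- from collections import defaultdict
-- from typing import Any
--
-- def _group_events_by_cycle(
--     events: list[dict[str, Any]],
-- ) -> dict[int, list[dict[str, Any]]]:
--     """Group events by cycle number, returning sorted dict."""
--     by_cycle: dict[int, list[dict[str, Any]]] = defaultdict(list)
--     for ev in events:
--         cycle = ev.get("cycle")
--         if isinstance(cycle, int):
--             by_cycle[cycle].append(ev)
--     return dict(sorted(by_cycle.items()))
-- ===== SOURCE B (Python) =====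
-- def _group_events_by_cycle(
--     events,
-- ):
--     """Group events by cycle number, returning sorted dict."""
--     keyed = sorted(
--         (ev for ev in events if isinstance(ev.get("cycle"), int)),
--         key=lambda ev: ev["cycle"],
--     )
--     result = {}
--     i = 0
--     n = len(keyed)
--     while i < n:
--         c = keyed[i]["cycle"]
--         j = i
--         while j < n and keyed[j]["cycle"] == c:
--             j += 1
--         result[c] = keyed[i:j]
--         i = j
--     return result
-- ===== Notes on version B (the rewrite author's own statement) =====
-- stated objective: alternative
-- what changed: Replaces A's defaultdict hash-grouping followed by a sort of the items with a sort-first strategy: filter the events that carry an int 'cycle', stably sort them by cycle, then build the dict in one grouped scan over the sorted list (consecutive runs of equal cycle become the groups), so no hash-accumulation or key sort is needed.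
import Mathlib
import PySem

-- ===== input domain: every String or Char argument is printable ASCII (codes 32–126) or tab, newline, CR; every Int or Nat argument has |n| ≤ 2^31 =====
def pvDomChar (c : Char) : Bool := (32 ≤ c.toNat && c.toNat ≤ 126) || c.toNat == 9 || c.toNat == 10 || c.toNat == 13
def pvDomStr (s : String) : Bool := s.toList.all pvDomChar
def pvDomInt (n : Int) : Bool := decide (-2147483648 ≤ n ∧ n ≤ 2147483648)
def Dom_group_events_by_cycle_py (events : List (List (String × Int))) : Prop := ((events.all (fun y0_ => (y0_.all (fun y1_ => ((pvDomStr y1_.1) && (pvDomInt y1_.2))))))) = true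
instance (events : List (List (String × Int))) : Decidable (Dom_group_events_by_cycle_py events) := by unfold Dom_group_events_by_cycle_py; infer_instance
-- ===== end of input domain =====

-- B replaces A's defaultdict hash-grouping + key sort by filter, stable sort by cycle, one grouped scan
-- over consecutive equal-cycle runs (objective: alternative decomposition; return value only, no mutation).

-- ===== PORT A =====
-- A: by_cycle = defaultdict(list); for ev: cycle = ev.get("cycle"); if isinstance(cycle, int): append;
--    return dict(sorted(by_cycle.items())).
-- Under the type convention every dict value is an int, so isinstance(cycle, int) is exactly "key present"
-- (ev.get returns Option Int).  sorted(by_cycle.items()) compares (key, value) tuples; the dict's keys are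
-- distinct, so Python never compares the value components and sorting by the key alone is exact.
def group_events_by_cycle_py (events : List (List (String × Int))) : List (Int × List (List (String × Int))) :=
  let by_cycle : PySem.Dict Int (List (List (String × Int))) :=
    events.foldl (fun d ev =>
      match PySem.Dict.get? (⟨ev⟩ : PySem.Dict String Int) "cycle" with
      | some cycle => d.modify cycle [] (fun l => l ++ [ev])
      | none => d) PySem.Dict.empty
  PySem.List.sorted by_cycle.items (fun p => p.1)

-- ===== PORT B =====
-- The two nested while loops of Source B: scan the sorted list, each consecutive run of equal cycle
-- (keyed[i:j]) becomes one dict entry.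
def pvGroupRuns (key : List (String × Int) → Int) :
    List (List (String × Int)) → List (Int × List (List (String × Int)))
  | [] => []
  | ev :: rest =>
    (key ev, ev :: rest.takeWhile (fun e => key e == key ev)) ::
      pvGroupRuns key (rest.dropWhile (fun e => key e == key ev))
termination_by l => l.length
decreasing_by simp only [List.length_cons]; exact Nat.lt_succ_of_le (List.length_dropWhile_le _ _)

-- Source B: keyed = sorted((ev for ev in events if isinstance(ev.get("cycle"), int)), key=lambda ev: ev["cycle"]).
-- The key lambda ev["cycle"] only runs on filtered events, where the key is present, so getD _ "cycle" 0 is exact.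
def group_events_by_cycle_py_alt (events : List (List (String × Int))) : List (Int × List (List (String × Int))) :=
  let keyed := PySem.List.sorted
    (events.filter (fun ev => (PySem.Dict.get? (⟨ev⟩ : PySem.Dict String Int) "cycle").isSome))
    (fun ev => PySem.Dict.getD (⟨ev⟩ : PySem.Dict String Int) "cycle" 0)
  pvGroupRuns (fun ev => PySem.Dict.getD (⟨ev⟩ : PySem.Dict String Int) "cycle" 0) keyed

-- ===== PRECONDITION & SPEC =====
def Spec_group_events_by_cycle_py (events : List (List (String × Int))) (out : List (Int × List (List (String × Int)))) : Prop := out = group_events_by_cycle_py_alt events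
instance (events : List (List (String × Int))) (out : List (Int × List (List (String × Int)))) : Decidable (Spec_group_events_by_cycle_py events out) := by unfold Spec_group_events_by_cycle_py; infer_instance

-- ===== CLAIM (what is proved, stated in full; the proofs are below) =====
def Claim_equal_group_events_by_cycle_py : Prop := ∀ (events : List (List (String × Int))), Dom_group_events_by_cycle_py events → Spec_group_events_by_cycle_py events (group_events_by_cycle_py events)

-- ===== LEMMAS AND PROOFS =====

-- proof-side abbreviations
def pvCyc (ev : List (String × Int)) : Option Int :=
  PySem.Dict.get? (⟨ev⟩ : PySem.Dict String Int) "cycle"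
def pvKeyF (ev : List (String × Int)) : Int :=
  PySem.Dict.getD (⟨ev⟩ : PySem.Dict String Int) "cycle" 0
def pvPairs (events : List (List (String × Int))) : List (Int × List (String × Int)) :=
  events.filterMap (fun ev => (pvCyc ev).map (fun c => (c, ev)))
def pvG (events : List (List (String × Int))) (c : Int) : List (List (String × Int)) :=
  events.filter (fun ev => pvCyc ev == some c)
def pvFilt (events : List (List (String × Int))) : List (List (String × Int)) :=
  events.filter (fun ev => (pvCyc ev).isSome)
def pvBf (a b : List (String × Int)) : Bool := decide (pvKeyF a < pvKeyF b)

lemma pvKeyF_eq {ev : List (String × Int)} {v : Int} (h : pvCyc ev = some v) : pvKeyF ev = v := by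
  unfold pvCyc at h
  unfold pvKeyF
  rw [PySem.Dict.getD, h]
  rfl

-- A's loop over events is the pair loop over pvPairs
lemma pvFoldA_eq (events : List (List (String × Int))) (d : PySem.Dict Int (List (List (String × Int)))) :
    events.foldl (fun d ev =>
      match pvCyc ev with
      | some cycle => d.modify cycle [] (fun l => l ++ [ev])
      | none => d) d
    = (pvPairs events).foldl (fun d p => d.modify p.1 [] (fun l => l ++ [p.2])) d := by
  induction events generalizing d with
  | nil => rfl
  | cons ev rest ih =>
    cases h : pvCyc ev with
    | none => simp only [List.foldl_cons, pvPairs, List.filterMap_cons, h, Option.map_none]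
              exact ih _
    | some c => simp only [List.foldl_cons, pvPairs, List.filterMap_cons, h, Option.map_some]
                exact ih _

lemma pvPairs_filter (events : List (List (String × Int))) (c : Int) :
    ((pvPairs events).filter (fun p => p.1 == c)).map (fun p => p.2) = pvG events c := by
  induction events with
  | nil => rfl
  | cons ev rest ih =>
    cases h : pvCyc ev with
    | none => simp only [pvPairs, pvG, List.filterMap_cons, List.filter_cons, h, Option.map_none] at ih ⊢
              simpa [h] using ih
    | some v =>
      by_cases hv : v = c
      · subst hv
        simp only [pvPairs, pvG, List.filterMap_cons, List.filter_cons, h, Option.map_some] at ih ⊢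
        simp [ih]
      · simp only [pvPairs, pvG, List.filterMap_cons, List.filter_cons, h, Option.map_some] at ih ⊢
        simp [hv, ih]

lemma pvPairs_fst_mem (events : List (List (String × Int))) (c : Int) :
    c ∈ (pvPairs events).map Prod.fst ↔ c ∈ (pvFilt events).map pvKeyF := by
  simp only [pvPairs, pvFilt, List.mem_map, List.mem_filterMap, List.mem_filter]
  constructor
  · rintro ⟨p, ⟨ev, hev, hp⟩, hfst⟩
    cases hc : pvCyc ev with
    | none => rw [hc] at hp; simp at hp
    | some v =>
      rw [hc] at hp
      simp only [Option.map_some, Option.some.injEq] at hp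
      refine ⟨ev, ⟨hev, by simp [hc]⟩, ?_⟩
      rw [pvKeyF_eq hc, ← hfst, ← hp]
  · rintro ⟨ev, ⟨hev, hsome⟩, hkey⟩
    obtain ⟨v, hc⟩ := Option.isSome_iff_exists.mp hsome
    refine ⟨(v, ev), ⟨ev, hev, by simp [hc]⟩, ?_⟩
    rw [← hkey, pvKeyF_eq hc]

lemma pvFilt_filter (events : List (List (String × Int))) (c : Int) :
    (pvFilt events).filter (fun a => pvKeyF a == c) = pvG events c := by
  induction events with
  | nil => rfl
  | cons ev rest ih =>
    cases hc : pvCyc ev with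
    | none => simp only [pvFilt, pvG, List.filter_cons, hc] at ih ⊢
              simpa [hc] using ih
    | some v =>
      have hk := pvKeyF_eq hc
      by_cases hv : v = c
      · subst hv
        simp only [pvFilt, pvG, List.filter_cons, hc] at ih ⊢
        simp [hk, ih]
      · simp only [pvFilt, pvG, List.filter_cons, hc] at ih ⊢
        simp [hk, hv, ih]

-- stability of insertion sort w.r.t. each key class
lemma pvFilter_eq_nil {c : Int} {l : List (List (String × Int))}
    (h : ∀ a ∈ l, c < pvKeyF a) : l.filter (fun a => pvKeyF a == c) = [] := by
  refine List.filter_eq_nil_iff.mpr ?_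
  intro a ha
  have := h a ha
  simp only [beq_iff_eq]
  omega

lemma pvInsertBy_filter_ne (x : List (String × Int)) (acc : List (List (String × Int))) (c : Int)
    (h : (pvKeyF x == c) = false) :
    (PySem.List.insertBy pvBf x acc).filter (fun a => pvKeyF a == c)
      = acc.filter (fun a => pvKeyF a == c) := by
  induction acc with
  | nil => simp [PySem.List.insertBy, h]
  | cons y ys ih =>
    by_cases hb : pvBf x y = true
    · simp [PySem.List.insertBy, hb, List.filter_cons, h]
    · simp only [PySem.List.insertBy, hb, if_false, Bool.false_eq_true, List.filter_cons]
      rw [ih]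

lemma pvInsertBy_filter_eq (x : List (String × Int)) (acc : List (List (String × Int)))
    (hp : List.Pairwise (fun a b => pvKeyF a ≤ pvKeyF b) acc) :
    (PySem.List.insertBy pvBf x acc).filter (fun a => pvKeyF a == pvKeyF x)
      = acc.filter (fun a => pvKeyF a == pvKeyF x) ++ [x] := by
  induction acc with
  | nil => simp [PySem.List.insertBy]
  | cons y ys ih =>
    obtain ⟨hy, hys⟩ := List.pairwise_cons.mp hp
    by_cases hb : pvBf x y = true
    · have hxy : pvKeyF x < pvKeyF y := by simpa [pvBf] using hb
      have hnil : (y :: ys).filter (fun a => pvKeyF a == pvKeyF x) = [] := by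
        refine pvFilter_eq_nil ?_
        intro a ha
        rcases List.mem_cons.mp ha with rfl | ha
        · exact hxy
        · exact lt_of_lt_of_le hxy (hy a ha)
      simp only [PySem.List.insertBy, hb, if_true]
      rw [List.filter_cons, if_pos (by simp), hnil, List.nil_append]
    · simp only [PySem.List.insertBy, hb, Bool.false_eq_true, if_false]
      rw [List.filter_cons, List.filter_cons, ih hys]
      by_cases hyc : (pvKeyF y == pvKeyF x) = true
      · simp [hyc]
      · simp [hyc]

lemma pvFoldIns_filter (xs : List (List (String × Int))) (acc : List (List (String × Int))) (c : Int)
    (hp : List.Pairwise (fun a b => pvKeyF a ≤ pvKeyF b) acc) :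
    (xs.foldl (fun acc x => PySem.List.insertBy pvBf x acc) acc).filter (fun a => pvKeyF a == c)
      = acc.filter (fun a => pvKeyF a == c) ++ xs.filter (fun a => pvKeyF a == c) := by
  induction xs generalizing acc with
  | nil => simp
  | cons x xs ih =>
    have hp' : List.Pairwise (fun a b => pvKeyF a ≤ pvKeyF b) (PySem.List.insertBy pvBf x acc) :=
      PySem.List.insertBy_pairwise_le pvKeyF x acc hp
    rw [List.foldl_cons, ih _ hp']
    by_cases hx : (pvKeyF x == c) = true
    · have hxc : pvKeyF x = c := by simpa using hx
      rw [← hxc, pvInsertBy_filter_eq x acc hp]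
      simp [List.append_assoc]
    · rw [pvInsertBy_filter_ne x acc c (by simpa using hx)]
      simp [hx]

lemma pvSorted_filter (xs : List (List (String × Int))) (c : Int) :
    (PySem.List.sorted xs pvKeyF).filter (fun a => pvKeyF a == c)
      = xs.filter (fun a => pvKeyF a == c) := by
  rw [PySem.List.sorted_eq_foldl_insertBy]
  have h := pvFoldIns_filter xs [] c List.Pairwise.nil
  simpa [pvBf] using h

-- after dropping the run of key c from a sorted list bounded below by c, all keys are > c
lemma pvDropWhile_gt (l : List (List (String × Int))) (c : Int)
    (hp : List.Pairwise (fun a b => pvKeyF a ≤ pvKeyF b) l)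
    (hb : ∀ x ∈ l, c ≤ pvKeyF x) :
    ∀ a ∈ l.dropWhile (fun e => pvKeyF e == c), c < pvKeyF a := by
  induction l with
  | nil => simp
  | cons x xs ih =>
    obtain ⟨hx, hxs⟩ := List.pairwise_cons.mp hp
    by_cases hpx : (pvKeyF x == c) = true
    · rw [List.dropWhile_cons, if_pos hpx]
      exact ih hxs (fun y hy => hb y (List.mem_cons_of_mem _ hy))
    · rw [List.dropWhile_cons, if_neg hpx]
      intro a ha
      have hcx : c < pvKeyF x := by
        have h1 := hb x List.mem_cons_self
        have h2 : pvKeyF x ≠ c := by simpa using hpx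
        omega
      rcases List.mem_cons.mp ha with rfl | ha
      · exact hcx
      · exact lt_of_lt_of_le hcx (hx a ha)

-- characterization of the grouped scan on a sorted list
lemma pvGR (L : List (List (String × Int)))
    (hp : List.Pairwise (fun a b => pvKeyF a ≤ pvKeyF b) L) :
    pvGroupRuns pvKeyF L
        = ((pvGroupRuns pvKeyF L).map Prod.fst).map (fun c => (c, L.filter (fun a => pvKeyF a == c)))
      ∧ List.Pairwise (· < ·) ((pvGroupRuns pvKeyF L).map Prod.fst)
      ∧ ∀ c, (c ∈ (pvGroupRuns pvKeyF L).map Prod.fst ↔ c ∈ L.map pvKeyF) := by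
  induction L using pvGroupRuns.induct pvKeyF with
  | case1 => simp [pvGroupRuns]
  | case2 ev rest ih =>
    obtain ⟨hx, hrest⟩ := List.pairwise_cons.mp hp
    set c := pvKeyF ev with hc
    set run := rest.takeWhile (fun e => pvKeyF e == c) with hrun
    set rest' := rest.dropWhile (fun e => pvKeyF e == c) with hrest'
    have hPrest' : List.Pairwise (fun a b => pvKeyF a ≤ pvKeyF b) rest' :=
      hrest.sublist (List.dropWhile_sublist _)
    have hgt : ∀ a ∈ rest', c < pvKeyF a := pvDropWhile_gt rest c hrest hx
    obtain ⟨ihEq, ihPW, ihMem⟩ := ih hPrest'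
    have hsplit : run ++ rest' = rest := List.takeWhile_append_dropWhile
    have hrunkey : ∀ a ∈ run, pvKeyF a = c := by
      intro a ha
      have := List.mem_takeWhile_imp ha
      simpa using this
    have hGRcons : pvGroupRuns pvKeyF (ev :: rest) = (c, ev :: run) :: pvGroupRuns pvKeyF rest' := by
      rw [pvGroupRuns]
    have hmemGT : ∀ c' ∈ (pvGroupRuns pvKeyF rest').map Prod.fst, c < c' := by
      intro c' hmem
      obtain ⟨a, ha, rfl⟩ := List.mem_map.mp ((ihMem c').mp hmem)
      exact hgt a ha
    have f1 : (ev :: rest).filter (fun a => pvKeyF a == c) = ev :: run := by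
      rw [List.filter_cons, if_pos (by simp [hc]), ← hsplit, List.filter_append]
      rw [List.filter_eq_self.mpr (fun a ha => by simp [hrunkey a ha]), pvFilter_eq_nil hgt]
      simp
    have f2 : ∀ c', c < c' → (ev :: rest).filter (fun a => pvKeyF a == c') = rest'.filter (fun a => pvKeyF a == c') := by
      intro c' hcc
      rw [List.filter_cons, if_neg (by simp [← hc]; omega), ← hsplit, List.filter_append]
      rw [List.filter_eq_nil_iff.mpr (fun a ha => by simp [hrunkey a ha]; omega)]
      simp
    refine ⟨?_, ?_, ?_⟩
    · rw [hGRcons]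
      simp only [List.map_cons, List.map_map]
      rw [f1]
      congr 1
      conv_lhs => rw [ihEq]
      rw [List.map_map]
      refine List.map_congr_left ?_
      intro p hmem
      simp only [Function.comp]
      rw [f2 p.1 (hmemGT p.1 (List.mem_map.mpr ⟨p, hmem, rfl⟩))]
    · rw [hGRcons, List.map_cons]
      exact List.pairwise_cons.mpr ⟨hmemGT, ihPW⟩
    · intro c'
      rw [hGRcons, List.map_cons]
      constructor
      · intro hm
        rcases List.mem_cons.mp hm with rfl | hm
        · exact List.mem_map.mpr ⟨ev, List.mem_cons_self, hc.symm⟩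
        · obtain ⟨a, ha, rfl⟩ := List.mem_map.mp ((ihMem c').mp hm)
          refine List.mem_map.mpr ⟨a, ?_, rfl⟩
          exact List.mem_cons_of_mem _ (by rw [← hsplit]; exact List.mem_append_right _ ha)
      · intro hm
        obtain ⟨a, ha, rfl⟩ := List.mem_map.mp hm
        rcases List.mem_cons.mp ha with rfl | ha
        · exact List.mem_cons_self
        · rw [← hsplit] at ha
          rcases List.mem_append.mp ha with ha | ha
          · rw [hrunkey a ha]; exact List.mem_cons_self
          · exact List.mem_cons_of_mem _ ((ihMem (pvKeyF a)).mpr (List.mem_map.mpr ⟨a, ha, rfl⟩))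

lemma pvMain (events : List (List (String × Int))) :
    group_events_by_cycle_py events = group_events_by_cycle_py_alt events := by
  show PySem.List.sorted
      (events.foldl (fun d ev => match pvCyc ev with
        | some cycle => d.modify cycle [] (fun l => l ++ [ev])
        | none => d) PySem.Dict.empty).items (fun p => p.1)
    = pvGroupRuns pvKeyF (PySem.List.sorted (pvFilt events) pvKeyF)
  rw [pvFoldA_eq]
  set dA := (pvPairs events).foldl (fun d p => d.modify p.1 [] (fun l => l ++ [p.2])) PySem.Dict.empty with hdA
  set L := PySem.List.sorted (pvFilt events) pvKeyF with hLdef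
  have hkeys : dA.keys = PySem.Set.update PySem.Dict.empty.keys ((pvPairs events).map Prod.fst) :=
    PySem.Dict.keys_foldl_modify_key (pvPairs events) Prod.fst [] (fun _ p l => l ++ [p.2]) PySem.Dict.empty
  have hnodupK : dA.keys.Nodup :=
    PySem.Dict.nodup_keys_foldl_modify_key (pvPairs events) Prod.fst [] (fun _ p l => l ++ [p.2]) PySem.Dict.empty
      (by simp [PySem.Dict.empty, PySem.Dict.keys])
  have hgetD : ∀ c, dA.getD c [] = pvG events c := by
    intro c
    rw [hdA, PySem.Dict.getD_foldl_modify_append]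
    have : PySem.Dict.empty.getD c ([] : List (List (String × Int))) = [] := rfl
    rw [this, List.nil_append]
    exact pvPairs_filter events c
  have hitems : dA.items = dA.keys.map (fun c => (c, pvG events c)) := by
    rw [PySem.Dict.items_eq_map_keys dA hnodupK []]
    exact List.map_congr_left (fun k _ => by rw [hgetD k])
  have hLpw : List.Pairwise (fun a b => pvKeyF a ≤ pvKeyF b) L :=
    PySem.List.sorted_pairwise (pvFilt events) pvKeyF
  obtain ⟨hBeq, hBpw, hBmem⟩ := pvGR L hLpw
  have hLfilt : ∀ c, L.filter (fun a => pvKeyF a == c) = pvG events c := by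
    intro c; rw [hLdef, pvSorted_filter, pvFilt_filter]
  have hBeq' : pvGroupRuns pvKeyF L
      = ((pvGroupRuns pvKeyF L).map Prod.fst).map (fun c => (c, pvG events c)) :=
    hBeq.trans (List.map_congr_left (fun c _ => by rw [hLfilt c]))
  have hmemEq : ∀ c, c ∈ (pvGroupRuns pvKeyF L).map Prod.fst ↔ c ∈ dA.keys := by
    intro c
    rw [hBmem c, hkeys]
    have h1 : c ∈ L.map pvKeyF ↔ c ∈ (pvFilt events).map pvKeyF :=
      ((PySem.List.sorted_perm (pvFilt events) pvKeyF false).map pvKeyF).mem_iff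
    rw [h1, ← pvPairs_fst_mem]
    rw [PySem.Set.mem_update]
    simp [PySem.Dict.empty, PySem.Dict.keys]
  have hnodupB : ((pvGroupRuns pvKeyF L).map Prod.fst).Nodup :=
    hBpw.imp (fun h => ne_of_lt h)
  have hperm : ((pvGroupRuns pvKeyF L).map Prod.fst).Perm dA.keys :=
    (List.perm_ext_iff_of_nodup hnodupB hnodupK).mpr hmemEq
  rw [hitems]
  refine PySem.List.sorted_eq_of_perm_of_pairwise_lt _ (pvGroupRuns pvKeyF L) (fun p => p.1) ?_ ?_
  · rw [hBeq']
    exact hperm.map _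
  · exact List.pairwise_map.mp hBpw

-- ===== VERDICT (by name: the statement is the Claim_ definition above) =====
theorem group_events_by_cycle_py_spec : Claim_equal_group_events_by_cycle_py := by
  intro events _
  exact pvMain events
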